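-- pv_equiv track=rewrite | github.com/WaterSpooner/Advent-of-Code | day12/d12p1.py | springRanges
-- ===== SOURCE A (Python) =====
-- def springRanges(springs):
--     unknown = []
--     springRange= []
--     start = -1
--     end = -1
--     count = 0
--     for i,s in enumerate(springs):
--         if s == "#":
--             count +=1
--             if start == -1:
--                 start = i
--         elif s != "#" and  end == -1 and start != -1:
--             end  = i
--             springRange.append((start,end))
--             start = -1
--             end = -1
--         if s == "?":
--             unknown.append(i)
--     if start != -1:
--         springRange.append((start,len(springs)))
--     return unknown,springRange,count
-- ===== SOURCE B (Python) =====
-- def springRanges(springs):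
--     unknown = [i for i, s in enumerate(springs) if s == "?"]
--     hashes = [i for i, s in enumerate(springs) if s == "#"]
--     springRange = []
--     for i in hashes:
--         if springRange and springRange[-1][1] == i:
--             springRange[-1] = (springRange[-1][0], i + 1)
--         else:
--             springRange.append((i, i + 1))
--     return unknown, springRange, len(hashes)
-- ===== Notes on version B (the rewrite author's own statement) =====
-- stated objective: alternative
-- what changed: B replaces A's single state-machine pass with -1 sentinels by three independent computations: two comprehensions collecting the question-mark and hash positions, count as the length of the hash-position list, and the ranges obtained by folding over the hash positions, merging consecutive indices into runs.
import Mathlib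
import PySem

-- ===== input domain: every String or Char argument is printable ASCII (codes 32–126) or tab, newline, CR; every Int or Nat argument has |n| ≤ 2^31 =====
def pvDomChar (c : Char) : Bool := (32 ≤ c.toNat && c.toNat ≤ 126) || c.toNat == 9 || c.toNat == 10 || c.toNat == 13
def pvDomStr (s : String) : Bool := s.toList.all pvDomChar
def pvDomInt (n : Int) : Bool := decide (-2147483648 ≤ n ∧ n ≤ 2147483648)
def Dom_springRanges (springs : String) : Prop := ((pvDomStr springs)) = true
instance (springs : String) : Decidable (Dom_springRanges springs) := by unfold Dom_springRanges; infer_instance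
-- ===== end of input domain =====

-- B replaces A's single state-machine pass (start/end = -1 sentinels) by three independent
-- computations: '?' positions, '#' positions, and ranges by merging consecutive '#' positions.

-- ===== PORT A =====
-- A's loop over enumerate(springs) with state (unknown, springRange, start, end, count);
-- the elif branch sets end = i, appends (start, end), then resets start = end = -1.
def aLoop : List (Int × Char) → List Int → List (Int × Int) → Int → Int → Int →
    List Int × List (Int × Int) × Int × Int × Int
  | [], u, r, st, en, c => (u, r, st, en, c)
  | (i, s) :: rest, u, r, st, en, c =>
    match (if s = '#' then
             (u, r, (if st = -1 then i else st), en, c + 1)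
           else if s ≠ '#' ∧ en = -1 ∧ st ≠ -1 then
             (u, r ++ [(st, i)], -1, -1, c)
           else (u, r, st, en, c) :
            List Int × List (Int × Int) × Int × Int × Int) with
    | (u', r', st', en', c') =>
      aLoop rest (if s = '?' then u' ++ [i] else u') r' st' en' c'

def springRanges (springs : String) : List Int × (List (Int × Int)) × Int :=
  let cs := springs.toList
  match aLoop (PySem.List.enumerate cs 0) [] [] (-1) (-1) 0 with
  | (u, r, st, _en, c) => (u, (if st ≠ -1 then r ++ [(st, (cs.length : Int))] else r), c)

-- ===== PORT B =====
-- the 'for i in hashes' loop of Source B: extend the last range if it ends exactly at i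
def bMerge (r : List (Int × Int)) (hs : List Int) : List (Int × Int) :=
  hs.foldl (fun r i =>
    match r.getLast? with
    | some (s, e) => if e = i then r.dropLast ++ [(s, i + 1)] else r ++ [(i, i + 1)]
    | none => r ++ [(i, i + 1)]) r

def springRanges_alt (springs : String) : List Int × (List (Int × Int)) × Int :=
  let cs := springs.toList
  let unknown := (PySem.List.enumerate cs 0).filterMap (fun p => if p.2 = '?' then some p.1 else none)
  let hashes := (PySem.List.enumerate cs 0).filterMap (fun p => if p.2 = '#' then some p.1 else none)
  (unknown, bMerge [] hashes, (hashes.length : Int))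

-- ===== PRECONDITION & SPEC =====
def Spec_springRanges (springs : String) (out : List Int × (List (Int × Int)) × Int) : Prop := out = springRanges_alt springs
instance (springs : String) (out : List Int × (List (Int × Int)) × Int) : Decidable (Spec_springRanges springs out) := by unfold Spec_springRanges; infer_instance

-- ===== CLAIM (what is proved, stated in full; the proofs are below) =====
def Claim_equal_springRanges : Prop := ∀ (springs : String), Dom_springRanges springs → Spec_springRanges springs (springRanges springs)

-- ===== LEMMAS AND PROOFS =====

-- proof-side specifications
def Qspec (cs : List Char) (i : Int) : List Int :=
  (PySem.List.enumerate cs i).filterMap (fun p => if p.2 = '?' then some p.1 else none)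

def Hspec (cs : List Char) (i : Int) : List Int :=
  (PySem.List.enumerate cs i).filterMap (fun p => if p.2 = '#' then some p.1 else none)

-- the runs of '#' in cs starting at index i, with optional pending run start
def Rspec : List Char → Int → Option Int → List (Int × Int)
  | [], _, none => []
  | [], i, some s => [(s, i)]
  | c :: rest, i, none => if c = '#' then Rspec rest (i+1) (some i) else Rspec rest (i+1) none
  | c :: rest, i, some s => if c = '#' then Rspec rest (i+1) (some s) else (s, i) :: Rspec rest (i+1) none

def postA (t : List Int × List (Int × Int) × Int × Int × Int) (L : Int) :
    List Int × List (Int × Int) × Int :=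
  (t.1, (if t.2.2.1 ≠ -1 then t.2.1 ++ [(t.2.2.1, L)] else t.2.1), t.2.2.2.2)


theorem Hspec_cons (c : Char) (rest : List Char) (i : Int) :
    Hspec (c :: rest) i = (if c = '#' then [i] else []) ++ Hspec rest (i+1) := by
  by_cases h : c = '#' <;> simp [Hspec, PySem.List.enumerate_cons, h]

theorem Qspec_cons (c : Char) (rest : List Char) (i : Int) :
    Qspec (c :: rest) i = (if c = '?' then [i] else []) ++ Qspec rest (i+1) := by
  by_cases h : c = '?' <;> simp [Qspec, PySem.List.enumerate_cons, h]

theorem bMerge_cons (r : List (Int × Int)) (i : Int) (hs : List Int) :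
    bMerge r (i :: hs) = bMerge
      (match r.getLast? with
       | some (s, e) => if e = i then r.dropLast ++ [(s, i + 1)] else r ++ [(i, i + 1)]
       | none => r ++ [(i, i + 1)]) hs := by
  simp [bMerge]

theorem lemmaA : ∀ (cs : List Char) (i : Int), 0 ≤ i →
    (∀ u r c, postA (aLoop (PySem.List.enumerate cs i) u r (-1) (-1) c) (i + cs.length)
        = (u ++ Qspec cs i, r ++ Rspec cs i none, c + (cs.count '#' : Int))) ∧
    (∀ u r c s, 0 ≤ s → postA (aLoop (PySem.List.enumerate cs i) u r s (-1) c) (i + cs.length)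
        = (u ++ Qspec cs i, r ++ Rspec cs i (some s), c + (cs.count '#' : Int))) := by
  intro cs
  induction cs with
  | nil =>
    intro i hi
    constructor
    · intro u r c
      simp [PySem.List.enumerate_nil, aLoop, postA, Qspec, Rspec]
    · intro u r c s hs
      simp [PySem.List.enumerate_nil, aLoop, postA, Qspec, Rspec,
            show s ≠ -1 by omega]
  | cons ch rest ih =>
    intro i hi
    have hlen : i + ((ch :: rest).length : Int) = (i + 1) + (rest.length : Int) := by
      push_cast [List.length_cons]; ring
    constructor
    · intro u r c
      rw [PySem.List.enumerate_cons, hlen]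
      by_cases h : ch = '#'
      · have step : aLoop ((i, ch) :: PySem.List.enumerate rest (i + 1)) u r (-1) (-1) c
            = aLoop (PySem.List.enumerate rest (i + 1)) u r i (-1) (c + 1) := by
          simp [aLoop, h]
        rw [step, (ih (i+1) (by omega)).2 u r (c+1) i hi]
        simp [Qspec_cons, Rspec, h]
        ring
      · have step : aLoop ((i, ch) :: PySem.List.enumerate rest (i + 1)) u r (-1) (-1) c
            = aLoop (PySem.List.enumerate rest (i + 1)) (if ch = '?' then u ++ [i] else u) r (-1) (-1) c := by
          simp [aLoop, h]
        rw [step, (ih (i+1) (by omega)).1 (if ch = '?' then u ++ [i] else u) r c]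
        by_cases hq : ch = '?' <;>
          simp [Qspec_cons, Rspec, h, hq]
    · intro u r c s hs
      rw [PySem.List.enumerate_cons, hlen]
      by_cases h : ch = '#'
      · have step : aLoop ((i, ch) :: PySem.List.enumerate rest (i + 1)) u r s (-1) c
            = aLoop (PySem.List.enumerate rest (i + 1)) u r s (-1) (c + 1) := by
          simp [aLoop, h, show s ≠ -1 by omega]
        rw [step, (ih (i+1) (by omega)).2 u r (c+1) s hs]
        simp [Qspec_cons, Rspec, h]
        ring
      · have step : aLoop ((i, ch) :: PySem.List.enumerate rest (i + 1)) u r s (-1) c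
            = aLoop (PySem.List.enumerate rest (i + 1)) (if ch = '?' then u ++ [i] else u) (r ++ [(s, i)]) (-1) (-1) c := by
          simp [aLoop, h, show s ≠ -1 by omega]
        rw [step, (ih (i+1) (by omega)).1 (if ch = '?' then u ++ [i] else u) (r ++ [(s, i)]) c]
        by_cases hq : ch = '?' <;>
          simp [Qspec_cons, Rspec, h, hq]

theorem lemmaB : ∀ (cs : List Char) (i : Int),
    (∀ r, (∀ se ∈ r.getLast?, se.2 < i) → bMerge r (Hspec cs i) = r ++ Rspec cs i none) ∧
    (∀ r s, bMerge (r ++ [(s, i)]) (Hspec cs i) = r ++ Rspec cs i (some s)) := by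
  intro cs
  induction cs with
  | nil =>
    intro i
    constructor
    · intro r _; simp [Hspec, PySem.List.enumerate_nil, bMerge, Rspec]
    · intro r s; simp [Hspec, PySem.List.enumerate_nil, bMerge, Rspec]
  | cons c rest ih =>
    intro i
    constructor
    · intro r hr
      rw [Hspec_cons]
      by_cases h : c = '#'
      · rw [if_pos h, List.singleton_append, bMerge_cons]
        have hstep : (match r.getLast? with
             | some (s, e) => if e = i then r.dropLast ++ [(s, i + 1)] else r ++ [(i, i + 1)]
             | none => r ++ [(i, i + 1)]) = r ++ [(i, i + 1)] := by
          rcases hlast : r.getLast? with _ | ⟨s0, e0⟩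
          · rfl
          · have : e0 < i := by have := hr (s0, e0) hlast; simpa using this
            simp [show ¬ (e0 = i) by omega]
        rw [hstep, (ih (i+1)).2 r i]
        simp [Rspec, h]
      · rw [if_neg h, List.nil_append,
            (ih (i+1)).1 r (by intro se hse; have := hr se hse; omega)]
        simp [Rspec, h]
    · intro r s
      rw [Hspec_cons]
      by_cases h : c = '#'
      · rw [if_pos h, List.singleton_append, bMerge_cons]
        have hstep : (match (r ++ [(s, i)]).getLast? with
             | some (s0, e0) => if e0 = i then (r ++ [(s, i)]).dropLast ++ [(s0, i + 1)] else (r ++ [(s, i)]) ++ [(i, i + 1)]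
             | none => (r ++ [(s, i)]) ++ [(i, i + 1)]) = r ++ [(s, i + 1)] := by
          simp
        rw [hstep, (ih (i+1)).2 r s]
        simp [Rspec, h]
      · rw [if_neg h, List.nil_append]
        have := (ih (i+1)).1 (r ++ [(s, i)]) (by
          intro se hse
          rw [List.getLast?_concat] at hse
          have : se = (s, i) := by simpa using hse.symm
          simp [this])
        rw [this]
        simp [Rspec, h]

theorem lengthH : ∀ (cs : List Char) (i : Int), (Hspec cs i).length = cs.count '#' := by
  intro cs
  induction cs with
  | nil => intro i; simp [Hspec, PySem.List.enumerate_nil]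
  | cons c rest ih =>
    intro i
    rw [Hspec_cons]
    by_cases h : c = '#' <;> simp [h, ih (i + 1)]

-- ===== VERDICT (by name: the statement is the Claim_ definition above) =====
theorem springRanges_spec : Claim_equal_springRanges := by
  intro springs _
  unfold Spec_springRanges springRanges springRanges_alt
  have hA := (lemmaA springs.toList 0 le_rfl).1 [] [] 0
  have hB := (lemmaB springs.toList 0).1 [] (by simp)
  have e1 : (PySem.List.enumerate springs.toList 0).filterMap
      (fun p => if p.2 = '?' then some p.1 else none) = Qspec springs.toList 0 := rfl
  have e2 : (PySem.List.enumerate springs.toList 0).filterMap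
      (fun p => if p.2 = '#' then some p.1 else none) = Hspec springs.toList 0 := rfl
  rcases h : aLoop (PySem.List.enumerate springs.toList 0) [] [] (-1) (-1) 0 with ⟨u, r, st, en, c⟩
  rw [h] at hA
  have hA' : (u, (if st ≠ -1 then r ++ [(st, (springs.toList.length : Int))] else r), c)
      = (Qspec springs.toList 0, Rspec springs.toList 0 none, (springs.toList.count '#' : Int)) := by
    simpa [postA] using hA
  simp only [e1, e2, hB, lengthH, h]
  simpa using hA'
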